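-- pv_equiv track=rewrite | github.com/naqushab/ScalerAcademy | Scaler/Intermediate/Subsequences and Subsets/HW1.py | solve
-- ===== SOURCE A (Python) =====
-- def solve(A):
--     A.sort()
--     max_sum, min_sum = 0, 0
--     for i in range(len(A)):
--         max_sum += (A[i]* 1<<i) % (10**9+7)
--     A.reverse()
--     for i in range(len(A)):
--         min_sum += (A[i]* 1<<i) % (10**9+7)
--     return (max_sum-min_sum) % (10**9+7)
-- ===== SOURCE B (Python) =====
-- def solve(A):
--     # Horner's rule on the sorted list: one zip pass, no powers, no indexing.
--     # Return value matches A; side effect differs: A reverse-sorts the list in place, B does not mutate it.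
--     M = 10 ** 9 + 7
--     B = sorted(A)
--     acc = 0
--     for x, y in zip(B, reversed(B)):
--         acc = (2 * acc + (y - x)) % M
--     return acc
-- ===== Notes on version B (the rewrite author's own statement) =====
-- stated objective: faster
-- what changed: B evaluates the answer by Horner's rule: one fold over zip(sorted, reversed-sorted) with acc = (2*acc + (y-x)) % M, so there are no powers of two, no shifts and no index arithmetic at all, instead of A's two indexed passes that build ever-larger big integers A[i]<<i and reduce each term separately.
import Mathlib
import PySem

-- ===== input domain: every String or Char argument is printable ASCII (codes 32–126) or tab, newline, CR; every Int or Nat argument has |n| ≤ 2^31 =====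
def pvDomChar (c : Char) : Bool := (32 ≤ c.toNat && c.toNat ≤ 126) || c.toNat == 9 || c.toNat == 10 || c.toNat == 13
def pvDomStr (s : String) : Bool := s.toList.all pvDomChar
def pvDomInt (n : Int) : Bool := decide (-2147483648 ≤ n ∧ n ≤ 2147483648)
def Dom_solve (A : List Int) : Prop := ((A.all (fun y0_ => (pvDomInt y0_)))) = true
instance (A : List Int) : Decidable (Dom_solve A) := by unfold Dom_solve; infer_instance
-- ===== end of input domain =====

-- B replaces A's two indexed big-integer passes (A[i]<<i per term) by Horner's rule: one fold over
-- zip(sorted, reversed-sorted) with acc = (2*acc + (y-x)) % M; return values agree, but the side effect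
-- differs: Python A leaves the list reverse-sorted, B does not mutate it (equivalence is about the return value).

-- ===== PORT A =====
def solve (A : List Int) : Int :=
  let B := PySem.List.sorted A (fun x => x)
  let maxSum := (PySem.List.pyRange 0 (B.length : Int)).foldl
    (fun s i => s + PySem.Int.mod ((PySem.List.pyGetD B i 0 * 1) <<< i.toNat) (10 ^ 9 + 7)) 0
  let C := B.reverse
  let minSum := (PySem.List.pyRange 0 (C.length : Int)).foldl
    (fun s i => s + PySem.Int.mod ((PySem.List.pyGetD C i 0 * 1) <<< i.toNat) (10 ^ 9 + 7)) 0
  PySem.Int.mod (maxSum - minSum) (10 ^ 9 + 7)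

-- ===== PORT B =====
def solve_alt (A : List Int) : Int :=
  let M : Int := 10 ^ 9 + 7
  let B := PySem.List.sorted A (fun x => x)
  (B.zip B.reverse).foldl (fun acc p => PySem.Int.mod (2 * acc + (p.2 - p.1)) M) 0

-- ===== PRECONDITION & SPEC =====
def Spec_solve (A : List Int) (out : Int) : Prop := out = solve_alt A
instance (A : List Int) (out : Int) : Decidable (Spec_solve A out) := by unfold Spec_solve; infer_instance

-- ===== CLAIM (what is proved, stated in full; the proofs are below) =====
def Claim_equal_solve : Prop := ∀ (A : List Int), Dom_solve A → Spec_solve A (solve A)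

-- ===== LEMMAS AND PROOFS =====

-- the modulus
def pvM : Int := 10 ^ 9 + 7

lemma pvM_pos : (0 : Int) < pvM := by norm_num [pvM]

-- a % M ≡ a
lemma pv_emod_modEq (a : Int) : (a % pvM) ≡ a [ZMOD pvM] :=
  Int.emod_emod_of_dvd a dvd_rfl

-- a sum of per-term mods is congruent to the sum of the terms
lemma pv_sum_mod_modEq {β : Type} (l : List β) (f : β → Int) :
    ((l.map (fun x => f x % pvM)).sum) ≡ ((l.map f).sum) [ZMOD pvM] := by
  induction l with
  | nil => rfl
  | cons x xs ih => simpa using (pv_emod_modEq (f x)).add ih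

-- W L = Σ_i L[i]·2^i  (ascending weights, head weight 1)
def pvW : List Int → Int
  | [] => 0
  | c :: cs => c + 2 * pvW cs

-- A-side loop over a list L, normalized: the foldl is a sum of per-term mods
lemma pv_loopA (L : List Int) :
    (PySem.List.pyRange 0 (L.length : Int)).foldl
      (fun s i => s + PySem.Int.mod ((PySem.List.pyGetD L i 0 * 1) <<< i.toNat) pvM) 0
    = ((List.range L.length).map (fun k => (L.getD k 0 * 2 ^ k) % pvM)).sum := by
  rw [PySem.List.pyRange_zero_nat, List.foldl_map, PySem.List.foldl_add]
  simp [PySem.List.pyGetD_natCast, Int.shiftLeft_eq, pvM]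

-- the indexed sum with weights 2^k is pvW
lemma pv_sum_eq_W (L : List Int) :
    ((List.range L.length).map (fun k => L.getD k 0 * 2 ^ k)).sum = pvW L := by
  induction L with
  | nil => simp [pvW]
  | cons c cs ih =>
    rw [List.length_cons, List.range_succ_eq_map, List.map_cons, List.sum_cons, List.map_map]
    have step1 : ((List.range cs.length).map ((fun k => (c :: cs).getD k 0 * 2 ^ k) ∘ Nat.succ)).sum
        = ((List.range cs.length).map (fun k => 2 * (cs.getD k 0 * 2 ^ k))).sum := by
      refine congrArg List.sum (List.map_congr_left fun k _ => ?_)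
      simp [Function.comp, pow_succ]; ring
    rw [step1, List.sum_map_mul_left, ih, pvW]
    simp
  
-- pvW on a snoc
lemma pvW_append_singleton (xs : List Int) (c : Int) :
    pvW (xs ++ [c]) = pvW xs + c * 2 ^ xs.length := by
  induction xs with
  | nil => simp [pvW]
  | cons x t ih => simp [pvW, ih, pow_succ]; ring

-- exact Horner fold (no mod): foldl over coefficients, MSB first
lemma pv_horner (cs : List Int) (a : Int) :
    cs.foldl (fun acc c => 2 * acc + c) a = a * 2 ^ cs.length + pvW cs.reverse := by
  induction cs generalizing a with
  | nil => simp [pvW]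
  | cons c t ih =>
    rw [List.foldl_cons, ih, List.reverse_cons, pvW_append_singleton]
    simp [pow_succ]; ring

-- the modded fold equals the exact fold mod M
lemma pv_horner_mod (cs : List Int) (a b : Int) (h : a = b % pvM) :
    cs.foldl (fun acc c => PySem.Int.mod (2 * acc + c) pvM) a
      = (cs.foldl (fun acc c => 2 * acc + c) b) % pvM := by
  induction cs generalizing a b with
  | nil => simpa using h
  | cons c t ih =>
    rw [List.foldl_cons, List.foldl_cons]
    refine ih _ _ ?_
    rw [PySem.Int.mod_eq_emod_of_pos pvM_pos]
    have : 2 * a + c ≡ 2 * b + c [ZMOD pvM] := by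
      exact Int.ModEq.add_right c (Int.ModEq.mul_left 2 (h ▸ pv_emod_modEq b))
    exact this
  
-- the coefficient list of B's fold: pvW of its reverse is W L − W L.reverse
lemma pv_coeffs (L : List Int) :
    pvW ((L.zip L.reverse).map (fun p => p.2 - p.1)).reverse
      = pvW L - pvW L.reverse := by
  have key : ∀ (xs ys : List Int), xs.length = ys.length →
      pvW ((xs.zip ys).map (fun p => p.2 - p.1)).reverse
        = pvW ys.reverse - pvW xs.reverse := by
    intro xs
    induction xs with
    | nil => intro ys h; simp [pvW] at *; simp [List.length_eq_zero_iff.mp h.symm, pvW]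
    | cons x t ih =>
      intro ys h
      cases ys with
      | nil => simp at h
      | cons y u =>
        have hu : u.length = t.length := by simpa using h.symm
        simp only [List.zip_cons_cons, List.map_cons, List.reverse_cons,
          pvW_append_singleton, ih u (by simpa using h), List.length_reverse,
          List.length_map, List.length_zip, hu, min_self]
        ring
  have := key L L.reverse (by simp)
  simpa using this

-- ===== VERDICT (by name: the statement is the Claim_ definition above) =====
theorem solve_spec : Claim_equal_solve := by
  intro A _
  unfold Spec_solve solve solve_alt
  simp only [show ((10 : Int) ^ 9 + 7) = pvM from rfl]
  set L := PySem.List.sorted A (fun x => x) with hL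
  rw [show (L.reverse.length : Int) = ((L.reverse.length : Nat) : Int) from rfl]
  rw [pv_loopA L, pv_loopA L.reverse,
      PySem.Int.mod_eq_emod_of_pos pvM_pos,
      show (List.foldl (fun acc p => PySem.Int.mod (2 * acc + (p.2 - p.1)) pvM) 0 (L.zip L.reverse))
        = (((L.zip L.reverse).map (fun p => p.2 - p.1)).foldl
            (fun acc c => PySem.Int.mod (2 * acc + c) pvM) 0) from (by rw [List.foldl_map]),
      pv_horner_mod _ 0 0 (by norm_num), pv_horner, pv_coeffs]
  have h1 := pv_sum_mod_modEq (List.range L.length) (fun k => L.getD k 0 * 2 ^ k)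
  have h2 := pv_sum_mod_modEq (List.range L.reverse.length) (fun k => L.reverse.getD k 0 * 2 ^ k)
  have := (h1.sub h2)
  rw [pv_sum_eq_W L, pv_sum_eq_W L.reverse] at this
  simpa using this
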